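-- pv_equiv track=rewrite | github.com/ToaruPen/Agentic-SDD | scripts/shogun-ops.py | compute_skills_readme_update
-- ===== SOURCE A (Python) =====
-- def compute_skills_readme_update(readme_text: str, name: str, summary: str) -> str:
--     link = f"- [{name}.md](./{name}.md): {summary}".rstrip()
--     if f"](./{name}.md)" in readme_text:
--         raise RuntimeError(
--             f"skills/README.md already references: {name}.md\n"
--             "next: pick a different skill name or remove the existing reference"
--         )
--
--     lines = readme_text.splitlines(True)
--     section_idx = -1
--     for i, ln in enumerate(lines):
--         if ln.strip() == "### Process Skills":
--             section_idx = i
--             break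
--     if section_idx < 0:
--         raise RuntimeError(
--             "skills/README.md is missing section: '### Process Skills'\n"
--             "next: add that section (or update this tool to target another section)"
--         )
--
--     insert_at = len(lines)
--     for j in range(section_idx + 1, len(lines)):
--         t = lines[j].strip()
--         if t.startswith("### ") or t.startswith("## ") or t == "---":
--             insert_at = j
--             break
--
--     # Insert at end of "Process Skills" section (before trailing blank lines).
--     while insert_at > section_idx + 1 and lines[insert_at - 1].strip() == "":
--         insert_at -= 1
--     lines.insert(insert_at, link + "\n")
--     return "".join(lines)
-- ===== SOURCE B (Python) =====
-- def compute_skills_readme_update(readme_text: str, name: str, summary: str) -> str: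
--     link = f"- [{name}.md](./{name}.md): {summary}".rstrip()
--     if f"](./{name}.md)" in readme_text:
--         raise RuntimeError(
--             f"skills/README.md already references: {name}.md\n"
--             "next: pick a different skill name or remove the existing reference"
--         )
--
--     lines = readme_text.splitlines(True)
--     for i, ln in enumerate(lines):
--         if ln.strip() == "### Process Skills":
--             section_idx = i
--             break
--     else:
--         raise RuntimeError(
--             "skills/README.md is missing section: '### Process Skills'\n"
--             "next: add that section (or update this tool to target another section)"
--         )
--
--     # Single forward pass: insert_at = one past the last content line of the
--     # section, never below section_idx + 1; stop at the next boundary heading.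
--     insert_at = section_idx + 1
--     for j in range(section_idx + 1, len(lines)):
--         t = lines[j].strip()
--         if t.startswith("### ") or t.startswith("## ") or t == "---":
--             break
--         if t:
--             insert_at = j + 1
--
--     return "".join(lines[:insert_at] + [link + "\n"] + lines[insert_at:])
-- ===== Notes on version B (the rewrite author's own statement) =====
-- stated objective: simpler
-- what changed: The two-phase insert-point search (scan forward to the next boundary heading, then walk backward over trailing blank lines) is replaced by a single forward pass that tracks one-past-the-last content line of the section, and list.insert is replaced by slice concatenation; Pre_ excludes only the inputs on which A raises RuntimeError (duplicate reference or missing '### Process Skills' section), where B raises too.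
import Mathlib
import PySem

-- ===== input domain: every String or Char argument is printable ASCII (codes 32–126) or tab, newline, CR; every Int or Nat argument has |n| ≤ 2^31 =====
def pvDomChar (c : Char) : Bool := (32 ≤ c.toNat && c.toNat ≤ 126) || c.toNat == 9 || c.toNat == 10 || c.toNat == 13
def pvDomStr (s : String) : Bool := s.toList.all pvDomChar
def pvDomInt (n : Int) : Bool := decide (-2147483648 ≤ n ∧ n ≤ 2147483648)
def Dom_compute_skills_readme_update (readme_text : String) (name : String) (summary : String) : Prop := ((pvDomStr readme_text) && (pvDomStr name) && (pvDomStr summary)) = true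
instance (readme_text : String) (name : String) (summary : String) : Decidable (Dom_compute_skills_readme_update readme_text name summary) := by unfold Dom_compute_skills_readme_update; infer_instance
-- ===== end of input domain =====

-- B replaces A's two-phase insert-point search (find next boundary heading, then walk
-- back over trailing blanks) with one forward pass tracking one-past-the-last content
-- line; objective: simpler.  A mutates the local `lines` list only (not an argument).

-- shared hand port of str.splitlines(True): exact on \n, \r\n, \r line ends
-- (the only line boundaries admitted by Dom_); `cur` holds the current line reversed
def pvSlk (cur : List Char) : List Char → List (List Char)
  | [] => if cur.isEmpty then [] else [cur.reverse]
  | '\n' :: rest => (cur.reverse ++ ['\n']) :: pvSlk [] rest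
  | '\r' :: '\n' :: rest => (cur.reverse ++ ['\r', '\n']) :: pvSlk [] rest
  | '\r' :: rest => (cur.reverse ++ ['\r']) :: pvSlk [] rest
  | c :: rest => pvSlk (c :: cur) rest

-- the boundary test `t.startswith("### ") or t.startswith("## ") or t == "---"` (both Pythons)
def pvIsBdry (t : List Char) : Bool :=
  PySem.Chars.startswith t "### ".toList || PySem.Chars.startswith t "## ".toList || t == "---".toList

-- ===== PORT A =====
-- `for i, ln in enumerate(lines): if ln.strip() == "### Process Skills": section_idx = i; break`
-- with the sentinel section_idx = -1 (hence the Int result)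
def pvFindSecA : List (List Char) → Nat → Int
  | [], _ => -1
  | ln :: rest, i =>
    if PySem.Chars.strip ln == "### Process Skills".toList then (i : Int)
    else pvFindSecA rest (i + 1)

-- `for j in range(section_idx+1, len(lines)): … insert_at = j; break`
def pvFindBdryA : List (List Char) → Nat → Option Nat
  | [], _ => none
  | ln :: rest, j =>
    if pvIsBdry (PySem.Chars.strip ln) then some j
    else pvFindBdryA rest (j + 1)

-- `while insert_at > section_idx + 1 and lines[insert_at - 1].strip() == "": insert_at -= 1`
def pvBackA (lines : List (List Char)) (lo : Nat) : Nat → Nat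
  | 0 => 0
  | k + 1 =>
    if lo < k + 1 && PySem.Chars.strip (lines.getD k []) == ([] : List Char)
    then pvBackA lines lo k else k + 1

def compute_skills_readme_update (readme_text : String) (name : String) (summary : String) : String :=
  let link := PySem.Chars.rstrip ("- [".toList ++ name.toList ++ ".md](./".toList ++ name.toList ++ ".md): ".toList ++ summary.toList)
  if PySem.Chars.isIn ("](./".toList ++ name.toList ++ ".md)".toList) readme_text.toList then
    ""  -- raise RuntimeError (duplicate reference): excluded by Pre_
  else
    let lines := pvSlk [] readme_text.toList
    let secI : Int := pvFindSecA lines 0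
    if secI < 0 then
      ""  -- raise RuntimeError (missing section): excluded by Pre_
    else
      let section_idx := secI.toNat
      let insert_at0 := (pvFindBdryA (lines.drop (section_idx + 1)) (section_idx + 1)).getD lines.length
      let insert_at := pvBackA lines (section_idx + 1) insert_at0
      String.ofList ((PySem.List.insert lines (insert_at : Int) (link ++ ['\n'])).flatten)

-- ===== PORT B =====
-- the for/else section scan of Source B
def pvFindSecB : List (List Char) → Nat → Option Nat
  | [], _ => none
  | ln :: rest, i =>
    if PySem.Chars.strip ln == "### Process Skills".toList then some i
    else pvFindSecB rest (i + 1)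

-- Source B's single forward pass: break at a boundary, bump insert_at past content lines
def pvScanB : List (List Char) → Nat → Nat → Nat
  | [], _, acc => acc
  | ln :: rest, j, acc =>
    let t := PySem.Chars.strip ln
    if pvIsBdry t then acc
    else pvScanB rest (j + 1) (if t == ([] : List Char) then acc else j + 1)

def compute_skills_readme_update_alt (readme_text : String) (name : String) (summary : String) : String :=
  let link := PySem.Chars.rstrip ("- [".toList ++ name.toList ++ ".md](./".toList ++ name.toList ++ ".md): ".toList ++ summary.toList)
  if PySem.Chars.isIn ("](./".toList ++ name.toList ++ ".md)".toList) readme_text.toList then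
    ""  -- raise RuntimeError: excluded by Pre_
  else
    let lines := pvSlk [] readme_text.toList
    match pvFindSecB lines 0 with
    | none => ""  -- raise RuntimeError: excluded by Pre_
    | some section_idx =>
      let insert_at := pvScanB (lines.drop (section_idx + 1)) (section_idx + 1) (section_idx + 1)
      String.ofList ((lines.take insert_at ++ [link ++ ['\n']] ++ lines.drop insert_at).flatten)

-- ===== PRECONDITION & SPEC =====
-- Pre_ excludes exactly the inputs on which A raises RuntimeError: a readme that
-- already references name.md, or one with no line stripping to "### Process Skills".
def Pre_compute_skills_readme_update (readme_text : String) (name : String) (summary : String) : Prop :=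
  PySem.Chars.isIn ("](./".toList ++ name.toList ++ ".md)".toList) readme_text.toList = false ∧
  (PySem.Chars.splitlines readme_text.toList).any (fun ln => PySem.Chars.strip ln == "### Process Skills".toList) = true
instance (readme_text : String) (name : String) (summary : String) : Decidable (Pre_compute_skills_readme_update readme_text name summary) := by unfold Pre_compute_skills_readme_update; infer_instance

def pvWitness_compute_skills_readme_update : String × String × String :=
  ("### Process Skills\n\nold line\n", "a", "s")

def Spec_compute_skills_readme_update (readme_text : String) (name : String) (summary : String) (out : String) : Prop := out = compute_skills_readme_update_alt readme_text name summary
instance (readme_text : String) (name : String) (summary : String) (out : String) : Decidable (Spec_compute_skills_readme_update readme_text name summary out) := by unfold Spec_compute_skills_readme_update; infer_instance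

-- ===== CLAIM (what is proved, stated in full; the proofs are below) =====
def Claim_equal_compute_skills_readme_update : Prop := ∀ (readme_text : String) (name : String) (summary : String), Dom_compute_skills_readme_update readme_text name summary → Pre_compute_skills_readme_update readme_text name summary → Spec_compute_skills_readme_update readme_text name summary (compute_skills_readme_update readme_text name summary)

-- ===== LEMMAS AND PROOFS =====

-- the two section scans agree
theorem pvSec_rel (u : List (List Char)) : ∀ i : Nat,
    pvFindSecA u i = (pvFindSecB u i).elim (-1) (fun s => (s : Int)) := by
  induction u with
  | nil => intro i; simp [pvFindSecA, pvFindSecB]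
  | cons ln rest ih =>
    intro i
    by_cases hb : (PySem.Chars.strip ln == "### Process Skills".toList) = true
    · simp only [pvFindSecA, pvFindSecB]; rw [if_pos hb, if_pos hb]; rfl
    · simp only [pvFindSecA, pvFindSecB]; rw [if_neg hb, if_neg hb]; exact ih (i + 1)

theorem pvSecB_some (u : List (List Char))
    (h : u.any (fun ln => PySem.Chars.strip ln == "### Process Skills".toList) = true) :
    ∀ i : Nat, ∃ s, pvFindSecB u i = some s := by
  induction u with
  | nil => simp at h
  | cons ln rest ih =>
    intro i
    simp only [pvFindSecB]
    by_cases hb : (PySem.Chars.strip ln == "### Process Skills".toList) = true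
    · exact ⟨i, by rw [if_pos hb]⟩
    · simp only [List.any_cons, hb, Bool.false_or] at h
      obtain ⟨s, hs⟩ := ih h (i + 1)
      exact ⟨s, by rw [if_neg hb]; exact hs⟩

theorem pvSecB_lt (u : List (List Char)) : ∀ i s : Nat,
    pvFindSecB u i = some s → i ≤ s ∧ s < i + u.length := by
  induction u with
  | nil => intro i s h; simp [pvFindSecB] at h
  | cons ln rest ih =>
    intro i s h
    simp only [pvFindSecB] at h
    split at h
    · injection h with h'; subst h'; simp only [List.length_cons]; omega
    · have := ih (i + 1) s h
      simp only [List.length_cons]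
      omega

-- relative first-boundary index (u.length if none)
def pvFbRel : List (List Char) → Nat
  | [] => 0
  | ln :: rest =>
    if pvIsBdry (PySem.Chars.strip ln) then 0
    else pvFbRel rest + 1

theorem pvFbRel_le (u : List (List Char)) : pvFbRel u ≤ u.length := by
  induction u with
  | nil => simp [pvFbRel]
  | cons ln rest ih => simp only [pvFbRel, List.length_cons]; split <;> omega

theorem pvFindBdryA_eq (u : List (List Char)) : ∀ lo : Nat,
    (pvFindBdryA u lo).getD (lo + u.length) = lo + pvFbRel u := by
  induction u with
  | nil => intro lo; simp [pvFindBdryA, pvFbRel]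
  | cons ln rest ih =>
    intro lo
    simp only [pvFindBdryA, pvFbRel, List.length_cons]
    split
    · simp
    · have := ih (lo + 1)
      rw [show lo + (rest.length + 1) = (lo + 1) + rest.length by omega, this]
      omega

-- drop-trailing-blank count: pvDtb u k = length of u.take k after removing trailing blanks
def pvDtb (u : List (List Char)) : Nat → Nat
  | 0 => 0
  | k + 1 => if PySem.Chars.strip (u.getD k []) == ([] : List Char) then pvDtb u k else k + 1

theorem pvDtb_le (u : List (List Char)) : ∀ k, pvDtb u k ≤ k := by
  intro k; induction k with
  | zero => simp [pvDtb]
  | succ k ih => simp only [pvDtb]; split <;> omega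

theorem pvBackA_base (lines : List (List Char)) (lo : Nat) : pvBackA lines lo lo = lo := by
  cases lo with
  | zero => simp [pvBackA]
  | succ m => simp [pvBackA]

theorem pvBackA_eq (lines : List (List Char)) (lo : Nat) : ∀ k : Nat,
    pvBackA lines lo (lo + k) = lo + pvDtb (lines.drop lo) k := by
  intro k; induction k with
  | zero => simpa [pvDtb] using pvBackA_base lines lo
  | succ k ih =>
    have hget : lines.getD (lo + k) ([] : List Char) = (lines.drop lo).getD k ([] : List Char) := by
      simp [List.getD_eq_getElem?_getD, List.getElem?_drop]
    have htrue : decide (lo < (lo + k) + 1) = true := by simp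
    rw [show lo + (k + 1) = (lo + k) + 1 by omega, pvBackA, hget, htrue]
    by_cases hb : (PySem.Chars.strip ((lines.drop lo).getD k ([] : List Char)) == ([] : List Char)) = true
    · rw [hb]
      simp only [Bool.and_self, if_true]
      rw [ih, pvDtb, if_pos hb]
    · rw [Bool.eq_false_iff.mpr (fun hc => hb hc)]
      simp only [Bool.and_false, Bool.false_eq_true, if_false]
      rw [pvDtb, if_neg hb]
      omega

theorem pvDtb_cons (ln : List Char) (rest : List (List Char)) : ∀ k : Nat,
    pvDtb (ln :: rest) (k + 1) =
      if pvDtb rest k = 0 then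
        (if PySem.Chars.strip ln == ([] : List Char) then 0 else 1)
      else pvDtb rest k + 1 := by
  intro k; induction k with
  | zero => simp [pvDtb]
  | succ k ih =>
    have hget : (ln :: rest).getD (k + 1) ([] : List Char) = rest.getD k ([] : List Char) := by
      simp [List.getD_eq_getElem?_getD]
    conv_lhs => rw [pvDtb]
    rw [hget]
    by_cases hb : PySem.Chars.strip (rest.getD k ([] : List Char)) == ([] : List Char)
    · rw [if_pos hb, ih]
      have : pvDtb rest (k + 1) = pvDtb rest k := by rw [pvDtb, if_pos hb]
      rw [this]
    · rw [if_neg hb]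
      have : pvDtb rest (k + 1) = k + 1 := by rw [pvDtb, if_neg hb]
      rw [this]
      simp

theorem pvScanB_eq (u : List (List Char)) : ∀ j acc : Nat, acc ≤ j →
    pvScanB u j acc =
      if pvDtb u (pvFbRel u) = 0 then acc else j + pvDtb u (pvFbRel u) := by
  induction u with
  | nil => intro j acc _; simp [pvScanB, pvFbRel, pvDtb]
  | cons ln rest ih =>
    intro j acc hacc
    simp only [pvScanB, pvFbRel]
    by_cases hbd : pvIsBdry (PySem.Chars.strip ln) = true
    · rw [if_pos hbd, if_pos hbd]
      simp [pvDtb]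
    · rw [if_neg hbd, if_neg hbd, pvDtb_cons]
      by_cases hb : (PySem.Chars.strip ln == ([] : List Char)) = true
      · rw [if_pos hb, if_pos hb, ih (j + 1) acc (by omega)]
        by_cases hz : pvDtb rest (pvFbRel rest) = 0
        · simp [hz]
        · rw [if_neg hz, if_neg hz, if_neg (by omega)]
          omega
      · rw [if_neg hb, if_neg hb, ih (j + 1) (j + 1) (le_refl _)]
        by_cases hz : pvDtb rest (pvFbRel rest) = 0
        · simp [hz]
        · rw [if_neg hz, if_neg hz, if_neg (by omega)]
          omega

-- ===== bridge: Pre_'s splitlines(False) view of the section test equals the ports' pvSlk view (inside Dom) =====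

-- the boundary-character test splitlines uses (definitionally the one inside PySem.Chars.splitlines)
def pvIsB (c : Char) : Bool :=
  decide (c.toNat = 10) || decide (c.toNat = 13) || decide (c.toNat = 11) || decide (c.toNat = 12) ||
    decide (c.toNat = 28) || decide (c.toNat = 29) || decide (c.toNat = 30) || decide (c.toNat = 133) ||
    decide (c.toNat = 8232) || decide (c.toNat = 8233)

theorem pvSplitlines_eq_go (l : List Char) :
    PySem.Chars.splitlines l = PySem.Chars.splitlines.go pvIsB l [] [] := rfl

theorem pvStrip_append_ws (t : List Char) (ht : ∀ c ∈ t, PySem.Chars.isspace c = true) (x : List Char) :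
    PySem.Chars.strip (x ++ t) = PySem.Chars.strip x := by
  have htnil : ∀ u : List Char, (∀ c ∈ u, PySem.Chars.isspace c = true) →
      List.dropWhile PySem.Chars.isspace u = [] := by
    intro u hu
    exact List.dropWhile_eq_nil_iff.mpr hu
  unfold PySem.Chars.strip PySem.Chars.lstrip PySem.Chars.rstrip
  rw [List.dropWhile_append]
  by_cases h : (List.dropWhile PySem.Chars.isspace x).isEmpty = true
  · rw [if_pos h, htnil t ht, List.isEmpty_iff.mp h]
  · rw [if_neg h, List.reverse_append, List.dropWhile_append,
      if_pos (by rw [htnil t.reverse (by intro c hc; exact ht c (List.mem_reverse.mp hc))]; rfl)]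

theorem pvP_append_term (x t : List Char) (ht : ∀ c ∈ t, PySem.Chars.isspace c = true) :
    (PySem.Chars.strip (x ++ t) == "### Process Skills".toList) =
      (PySem.Chars.strip x == "### Process Skills".toList) := by
  rw [pvStrip_append_ws t ht]

theorem pvIsB_dom (c : Char) (hc : pvDomChar c = true) (h10 : c ≠ '\n') (h13 : c ≠ '\r') :
    pvIsB c = false := by
  have hn10 : c.toNat ≠ 10 := by
    intro h
    exact h10 (Char.ext (UInt32.toNat_inj.mp (by simpa using h)))
  have hn13 : c.toNat ≠ 13 := by
    intro h
    exact h13 (Char.ext (UInt32.toNat_inj.mp (by simpa using h)))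
  unfold pvDomChar at hc
  unfold pvIsB
  simp only [Bool.or_eq_true, Bool.and_eq_true, decide_eq_true_eq, beq_iff_eq,
    Nat.le_iff_lt_or_eq] at hc ⊢
  simp only [Bool.or_eq_false_iff, decide_eq_false_iff_not]
  omega

theorem pvGoAny : ∀ (n : Nat) (l cur : List Char) (acc : List (List Char)),
    l.length ≤ n → (∀ c ∈ l, pvDomChar c = true) →
    (PySem.Chars.splitlines.go pvIsB l cur acc).any
        (fun ln => PySem.Chars.strip ln == "### Process Skills".toList) =
      (acc.any (fun ln => PySem.Chars.strip ln == "### Process Skills".toList) ||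
        (pvSlk cur l).any (fun ln => PySem.Chars.strip ln == "### Process Skills".toList)) := by
  intro n
  induction n with
  | zero =>
    intro l cur acc hl _
    have hnil : l = [] := List.length_eq_zero_iff.mp (Nat.le_zero.mp hl)
    subst hnil
    simp only [PySem.Chars.splitlines.go, pvSlk]
    by_cases hcur : cur.isEmpty = true
    · simp [hcur, List.any_reverse]
    · simp [hcur, List.any_reverse, Bool.or_comm]
  | succ n ih =>
    intro l cur acc hl hdom
    rcases l with _ | ⟨c, rest⟩
    · simp only [PySem.Chars.splitlines.go, pvSlk]
      by_cases hcur : cur.isEmpty = true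
      · simp [hcur, List.any_reverse]
      · simp [hcur, List.any_reverse, Bool.or_comm]
    · by_cases hc10 : c = '\n'
      · subst hc10
        have hgo : PySem.Chars.splitlines.go pvIsB ('\n' :: rest) cur acc =
            PySem.Chars.splitlines.go pvIsB rest [] (cur.reverse :: acc) := by
          simp [PySem.Chars.splitlines.go, pvIsB]
        rw [hgo, ih rest [] (cur.reverse :: acc) (by simpa using hl)
              (fun c hc => hdom c (List.mem_cons_of_mem _ hc))]
        have hq := pvP_append_term cur.reverse ['\n'] (by intro c hc; fin_cases hc <;> decide)
        simp only [pvSlk, List.any_cons, List.any_nil, hq]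
        cases hp : (PySem.Chars.strip cur.reverse == "### Process Skills".toList) <;> simp [hp, Bool.or_comm, Bool.or_assoc, Bool.or_left_comm]
      · by_cases hc13 : c = '\r'
        · subst hc13
          rcases rest with _ | ⟨c2, rest2⟩
          · have hgo : PySem.Chars.splitlines.go pvIsB ['\r'] cur acc =
                PySem.Chars.splitlines.go pvIsB [] [] (cur.reverse :: acc) := by
              simp [PySem.Chars.splitlines.go, pvIsB]
            rw [hgo, ih [] [] (cur.reverse :: acc) (by simp) (by simp)]
            have hq := pvP_append_term cur.reverse ['\r'] (by intro c hc; fin_cases hc <;> decide)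
            simp only [pvSlk, List.any_cons, List.any_nil, hq]
            cases hp : (PySem.Chars.strip cur.reverse == "### Process Skills".toList) <;> simp [hp, Bool.or_comm, Bool.or_assoc, Bool.or_left_comm]
          · by_cases hc2 : c2 = '\n'
            · subst hc2
              have hgo : PySem.Chars.splitlines.go pvIsB ('\r' :: '\n' :: rest2) cur acc =
                  PySem.Chars.splitlines.go pvIsB rest2 [] (cur.reverse :: acc) := by
                simp [PySem.Chars.splitlines.go]
              rw [hgo, ih rest2 [] (cur.reverse :: acc)
                    (by simp at hl ⊢; omega)
                    (fun c hc => hdom c (by simp [hc]))]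
              have hq := pvP_append_term cur.reverse ['\r', '\n'] (by intro c hc; fin_cases hc <;> decide)
              simp only [pvSlk, List.any_cons, List.any_nil, hq]
              cases hp : (PySem.Chars.strip cur.reverse == "### Process Skills".toList) <;> simp [hp, Bool.or_comm, Bool.or_assoc, Bool.or_left_comm]
            · have hgo : PySem.Chars.splitlines.go pvIsB ('\r' :: c2 :: rest2) cur acc =
                  PySem.Chars.splitlines.go pvIsB (c2 :: rest2) [] (cur.reverse :: acc) := by
                rw [PySem.Chars.splitlines.go.eq_def]
                split
                · rename_i heq; simp at heq
                · rename_i heq; injection heq with h1 h2; injection h2 with h21 h22; exact absurd h21 hc2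
                · rename_i heq; injection heq with h1 h2; subst h1; subst h2
                  rw [if_pos (show pvIsB '\r' = true by decide)]
              have hslk : pvSlk cur ('\r' :: c2 :: rest2) =
                  (cur.reverse ++ ['\r']) :: pvSlk [] (c2 :: rest2) := by
                rw [pvSlk.eq_def]
                split
                · rename_i heq; simp at heq
                · rename_i heq; injection heq with h1 _; exact absurd h1 (by decide)
                · rename_i heq; injection heq with h1 h2; injection h2 with h21 h22; exact absurd h21 hc2
                · rename_i heq; injection heq with h1 h2; subst h2; rfl
                · rename_i heq; injection heq with h1 h2; exact absurd h1.symm (by assumption)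
              rw [hgo, ih (c2 :: rest2) [] (cur.reverse :: acc)
                    (by simpa using hl)
                    (fun c hc => hdom c (List.mem_cons_of_mem _ hc)),
                  hslk]
              have hq := pvP_append_term cur.reverse ['\r'] (by intro c hc; fin_cases hc <;> decide)
              simp only [List.any_cons, List.any_nil, hq]
              cases hp : (PySem.Chars.strip cur.reverse == "### Process Skills".toList) <;> simp [hp, Bool.or_comm, Bool.or_assoc, Bool.or_left_comm]
        · have hB : pvIsB c = false :=
            pvIsB_dom c (hdom c (List.mem_cons_self ..)) hc10 hc13
          have hgo : PySem.Chars.splitlines.go pvIsB (c :: rest) cur acc =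
              PySem.Chars.splitlines.go pvIsB rest (c :: cur) acc := by
            rw [PySem.Chars.splitlines.go.eq_def]
            split
            · rename_i heq; simp at heq
            · rename_i heq; injection heq with h1 _; exact absurd h1 hc13
            · rename_i heq; injection heq with h1 h2; subst h1; subst h2
              rw [hB]; simp
          have hslk : pvSlk cur (c :: rest) = pvSlk (c :: cur) rest := by
            rw [pvSlk.eq_def]
            split
            · rename_i heq; simp at heq
            · rename_i heq; injection heq with h1 _; exact absurd h1 hc10
            · rename_i heq; injection heq with h1 _; exact absurd h1 hc13
            · rename_i heq; injection heq with h1 _; exact absurd h1 hc13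
            · rename_i heq; injection heq with h1 h2; subst h1; subst h2; rfl
          rw [hgo, hslk]
          exact ih rest (c :: cur) acc (by simpa using hl)
            (fun c hc => hdom c (List.mem_cons_of_mem _ hc))

-- ===== VERDICT (by name: the statement is the Claim_ definition above) =====
theorem compute_skills_readme_update_spec : Claim_equal_compute_skills_readme_update := by
  intro readme_text name summary hdom hpre
  obtain ⟨h1, h2⟩ := hpre
  have hdom' : ∀ c ∈ readme_text.toList, pvDomChar c = true := by
    unfold Dom_compute_skills_readme_update pvDomStr at hdom
    simp only [Bool.and_eq_true, List.all_eq_true] at hdom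
    exact fun c hc => hdom.1.1 c hc
  have h2' : (pvSlk [] readme_text.toList).any
      (fun ln => PySem.Chars.strip ln == "### Process Skills".toList) = true := by
    rw [pvSplitlines_eq_go,
        pvGoAny readme_text.toList.length readme_text.toList [] [] (le_refl _) hdom'] at h2
    simpa using h2
  unfold Spec_compute_skills_readme_update
  unfold compute_skills_readme_update compute_skills_readme_update_alt
  simp only [h1, Bool.false_eq_true, if_false]
  set lines := pvSlk [] readme_text.toList with hlines
  obtain ⟨s, hs⟩ := pvSecB_some lines h2' 0
  have hlt : s < lines.length := by have := pvSecB_lt lines 0 s hs; omega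
  have hA : pvFindSecA lines 0 = (s : Int) := by rw [pvSec_rel, hs]; rfl
  rw [hA, hs]
  rw [if_neg (by omega)]
  simp only [Int.toNat_natCast]
  -- index equality
  have hlo : s + 1 ≤ lines.length := by omega
  have hlen : lines.length = (s + 1) + (lines.drop (s + 1)).length := by
    simp [List.length_drop]; omega
  set u := lines.drop (s + 1) with hu
  have hfb : (pvFindBdryA u (s + 1)).getD lines.length = (s + 1) + pvFbRel u := by
    rw [hlen]; exact pvFindBdryA_eq u (s + 1)
  have hback : pvBackA lines (s + 1) ((s + 1) + pvFbRel u) = (s + 1) + pvDtb u (pvFbRel u) :=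
    pvBackA_eq lines (s + 1) (pvFbRel u)
  have hscan : pvScanB u (s + 1) (s + 1) =
      (s + 1) + pvDtb u (pvFbRel u) := by
    rw [pvScanB_eq u (s + 1) (s + 1) (le_refl _)]
    split <;> omega
  set p := (s + 1) + pvDtb u (pvFbRel u) with hp
  have hple : p ≤ lines.length := by
    have h1' := pvDtb_le u (pvFbRel u)
    have h2' := pvFbRel_le u
    omega
  rw [hfb, hback, hscan]
  rw [PySem.List.insert_natCast lines p _ hple]
  simp
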